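-- pv_equiv track=rewrite | github.com/Sedith/advent_of_code | 2024/21 - Keypad Conundrum/part1.py | meta_code
-- ===== SOURCE A (Python) =====
-- def meta_code(code, keypad):
--     meta_code = ''
--     for start, end in zip('A' + code[:-1], code):
--         di = keypad[end][0] - keypad[start][0]
--         dj = keypad[end][1] - keypad[start][1]
--         path = '<' * (-dj) + 'v' * di + '^' * (-di) + '>' * dj
--         ## invert path if it goes through the empty key, if the empty key is there, its at the 'corner'
--         if path and path[0] in ['v', '^'] and keypad[' '] == (keypad[end][0], keypad[start][1]) \
--         or path and path[0] in ['<', '>'] and keypad[' '] == (keypad[start][0], keypad[end][1]):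
--             path = path[::-1]
--         meta_code += path + 'A'
--     return meta_code
-- ===== SOURCE B (Python) =====
-- def meta_code(code, keypad):
--     out = []
--     prev = 'A'
--     for ch in code:
--         i, j = keypad[prev]
--         ti, tj = keypad[ch]
--         gap = keypad.get(' ')
--         hfirst = tj < j
--         if hfirst:
--             if gap == (i, tj):
--                 hfirst = False
--         elif i != ti and gap == (ti, j):
--             hfirst = True
--         while (i, j) != (ti, tj):
--             if (hfirst and j != tj) or i == ti:
--                 if tj < j:
--                     out.append('<'); j -= 1
--                 else:
--                     out.append('>'); j += 1
--             else:
--                 if i < ti: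
--                     out.append('v'); i += 1
--                 else:
--                     out.append('^'); i -= 1
--         out.append('A')
--         prev = ch
--     return ''.join(out)
-- ===== Notes on version B (the rewrite author's own statement) =====
-- stated objective: alternative
-- what changed: B is a cell-by-cell grid walker: it decides an axis preference once per key pair and then simulates the cursor one step at a time, emitting one move character per step until it reaches the target, instead of A's construction of a canonical '<v^>' run string that is conditionally reversed.
import Mathlib
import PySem

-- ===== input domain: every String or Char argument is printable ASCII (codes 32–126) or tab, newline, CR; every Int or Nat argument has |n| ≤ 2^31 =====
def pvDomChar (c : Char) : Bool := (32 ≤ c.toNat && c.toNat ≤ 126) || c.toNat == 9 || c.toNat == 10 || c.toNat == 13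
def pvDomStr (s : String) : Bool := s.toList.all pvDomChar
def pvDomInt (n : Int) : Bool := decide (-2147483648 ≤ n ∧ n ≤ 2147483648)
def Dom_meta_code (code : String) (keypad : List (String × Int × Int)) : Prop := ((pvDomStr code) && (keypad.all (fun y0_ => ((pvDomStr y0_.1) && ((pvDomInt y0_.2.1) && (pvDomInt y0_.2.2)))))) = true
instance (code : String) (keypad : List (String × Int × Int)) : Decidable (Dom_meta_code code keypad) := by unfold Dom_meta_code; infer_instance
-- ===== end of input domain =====

-- B replaces A's build-a-canonical-run-string-and-maybe-reverse-it by a cell-by-cell grid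
-- walker: it fixes an axis preference per key pair, then simulates the cursor one step at a
-- time, emitting one move character per step until the target key is reached (objective:
-- alternative decomposition, same cost).

-- dict lookup (first match = Python dict under the assoc-list convention); shared by both ports
def pvLk (keypad : List (String × Int × Int)) (k : String) : Option (Int × Int) :=
  (keypad.find? (fun p => p.1 == k)).map (fun p => p.2)

-- ===== PORT A =====
-- loop body of A, named so the proofs can speak about one step; values exactly as in Source A
-- (keypad[x] is total here via getD (0,0): Pre_meta_code rules out the KeyError inputs)
def pvChunkA (keypad : List (String × Int × Int)) (s e : Char) : List Char :=
  let pe := (pvLk keypad e.toString).getD (0, 0)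
  let ps := (pvLk keypad s.toString).getD (0, 0)
  let di := pe.1 - ps.1
  let dj := pe.2 - ps.2
  let path := List.replicate (-dj).toNat '<' ++ List.replicate di.toNat 'v' ++
              List.replicate (-di).toNat '^' ++ List.replicate dj.toNat '>'
  let path :=
    if (path ≠ [] ∧ (path.head? = some 'v' ∨ path.head? = some '^') ∧
          pvLk keypad " " = some (pe.1, ps.2))
       ∨ (path ≠ [] ∧ (path.head? = some '<' ∨ path.head? = some '>') ∧
          pvLk keypad " " = some (ps.1, pe.2))
    then path.reverse else path
  path ++ ['A']

def meta_code (code : String) (keypad : List (String × Int × Int)) : String :=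
  -- zip('A' + code[:-1], code); code[:-1] is PySem.List.slice … (some (-1))
  String.ofList
    ((List.zip ('A' :: PySem.List.slice code.toList none (some (-1))) code.toList).foldl
      (fun acc se => acc ++ pvChunkA keypad se.1 se.2) [])

-- ===== PORT B =====
-- the while loop of Source B: walk one cell per emitted character until (i,j) = (ti,tj).
-- The loop moves one cell closer to the target every iteration, so it runs exactly
-- (ti-i).natAbs + (tj-j).natAbs times; that count is the structural recursion fuel.
def pvStepGo : Nat → Int → Int → Int → Int → Bool → List Char
  | 0, _, _, _, _, _ => []
  | n + 1, i, j, ti, tj, hfirst =>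
    if (i, j) = (ti, tj) then []
    else if (hfirst = true ∧ j ≠ tj) ∨ i = ti then
      if tj < j then '<' :: pvStepGo n i (j - 1) ti tj hfirst
      else '>' :: pvStepGo n i (j + 1) ti tj hfirst
    else
      if i < ti then 'v' :: pvStepGo n (i + 1) j ti tj hfirst
      else '^' :: pvStepGo n (i - 1) j ti tj hfirst

def pvStep (i j ti tj : Int) (hfirst : Bool) : List Char :=
  pvStepGo ((ti - i).natAbs + (tj - j).natAbs) i j ti tj hfirst

-- one iteration of Source B's outer for loop (position lookups, axis preference, walk, 'A')
def pvChunkB (keypad : List (String × Int × Int)) (prev ch : Char) : List Char :=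
  let p := (pvLk keypad prev.toString).getD (0, 0)
  let q := (pvLk keypad ch.toString).getD (0, 0)
  let gap := pvLk keypad " "
  let hfirst : Bool :=
    if q.2 < p.2 then (if gap = some (p.1, q.2) then false else true)
    else (if p.1 ≠ q.1 ∧ gap = some (q.1, p.2) then true else false)
  pvStep p.1 p.2 q.1 q.2 hfirst ++ ['A']

def meta_code_alt (code : String) (keypad : List (String × Int × Int)) : String :=
  -- loop carrying (prev, out); ''.join(out) over single characters = the char list itself
  String.ofList
    ((code.toList.foldl
      (fun (st : Char × List Char) ch => (ch, st.2 ++ pvChunkB keypad st.1 ch))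
      ('A', [])).2)

-- ===== PRECONDITION & SPEC =====
-- Exactly the inputs where Python A returns: every start/end key of the walk is in the dict,
-- and ' ' is in the dict whenever some step actually moves (only then is keypad[' '] read).
def Pre_meta_code (code : String) (keypad : List (String × Int × Int)) : Prop :=
  ∀ se ∈ List.zip ('A' :: code.toList.dropLast) code.toList,
    (pvLk keypad se.1.toString).isSome ∧ (pvLk keypad se.2.toString).isSome ∧
    (pvLk keypad se.1.toString ≠ pvLk keypad se.2.toString → (pvLk keypad " ").isSome)
instance (code : String) (keypad : List (String × Int × Int)) : Decidable (Pre_meta_code code keypad) := by unfold Pre_meta_code; infer_instance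

def pvWitness_meta_code : String × (List (String × Int × Int)) :=
  ("029A", [("7",0,0),("8",0,1),("9",0,2),("4",1,0),("5",1,1),("6",1,2),
            ("1",2,0),("2",2,1),("3",2,2),(" ",3,0),("0",3,1),("A",3,2)])

def Spec_meta_code (code : String) (keypad : List (String × Int × Int)) (out : String) : Prop := out = meta_code_alt code keypad
instance (code : String) (keypad : List (String × Int × Int)) (out : String) : Decidable (Spec_meta_code code keypad out) := by unfold Spec_meta_code; infer_instance

-- ===== CLAIM (what is proved, stated in full; the proofs are below) =====
def Claim_equal_meta_code : Prop := ∀ (code : String) (keypad : List (String × Int × Int)), Dom_meta_code code keypad → Pre_meta_code code keypad → Spec_meta_code code keypad (meta_code code keypad)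

-- ===== LEMMAS AND PROOFS =====

-- the walker on a single axis: vertical only (j already at target)
lemma step_vonly (b : Bool) : ∀ n (i j ti : Int), (ti - i).natAbs = n →
    pvStepGo n i j ti j b = List.replicate (ti - i).toNat 'v' ++ List.replicate (i - ti).toNat '^' := by
  intro n
  induction n with
  | zero =>
    intro i j ti h
    have : ti = i := by omega
    subst this
    simp [pvStepGo]
  | succ n ih =>
    intro i j ti h
    have hne : i ≠ ti := by omega
    rw [pvStepGo]
    rcases lt_or_gt_of_ne hne with hlt | hgt
    · have e1 : (ti - i).toNat = (ti - (i + 1)).toNat + 1 := by omega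
      have e2 : (i - ti).toNat = 0 := by omega
      have e3 : ((i + 1) - ti).toNat = 0 := by omega
      simp [hne, hlt, ih (i + 1) j ti (by omega), e1, e2, e3, List.replicate_succ]
    · have e1 : (ti - i).toNat = 0 := by omega
      have e1' : (ti - (i - 1)).toNat = 0 := by omega
      have e2 : (i - ti).toNat = ((i - 1) - ti).toNat + 1 := by omega
      have hnl : ¬ i < ti := by omega
      simp [hne, hnl, ih (i - 1) j ti (by omega), e1, e1', e2, List.replicate_succ]

-- horizontal only (i already at target)
lemma step_honly (b : Bool) : ∀ n (i j tj : Int), (tj - j).natAbs = n →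
    pvStepGo n i j i tj b = List.replicate (j - tj).toNat '<' ++ List.replicate (tj - j).toNat '>' := by
  intro n
  induction n with
  | zero =>
    intro i j tj h
    have : tj = j := by omega
    subst this
    simp [pvStepGo]
  | succ n ih =>
    intro i j tj h
    have hne : j ≠ tj := by omega
    rw [pvStepGo]
    rcases lt_or_gt_of_ne hne with hlt | hgt
    · have e1 : (j - tj).toNat = 0 := by omega
      have e1' : ((j + 1) - tj).toNat = 0 := by omega
      have e2 : (tj - j).toNat = (tj - (j + 1)).toNat + 1 := by omega
      have hnl : ¬ tj < j := by omega
      simp [hne, hnl, ih i (j + 1) tj (by omega), e1, e1', e2, List.replicate_succ]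
    · have e1 : (j - tj).toNat = ((j - 1) - tj).toNat + 1 := by omega
      have e2 : (tj - j).toNat = 0 := by omega
      have e3 : (tj - (j - 1)).toNat = 0 := by omega
      have hl : tj < j := by omega
      simp [hne, hl, ih i (j - 1) tj (by omega), e1, e2, e3, List.replicate_succ]

-- closed form, horizontal-first
lemma step_true_aux : ∀ n m (i j ti tj : Int), (tj - j).natAbs = n → (ti - i).natAbs = m →
    pvStepGo (n + m) i j ti tj true =
      List.replicate (j - tj).toNat '<' ++ List.replicate (tj - j).toNat '>' ++
      List.replicate (ti - i).toNat 'v' ++ List.replicate (i - ti).toNat '^' := by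
  intro n
  induction n with
  | zero =>
    intro m i j ti tj h hm
    obtain rfl : tj = j := by omega
    simp [Nat.zero_add, step_vonly true m i tj ti hm]
  | succ n ih =>
    intro m i j ti tj h hm
    have hne : j ≠ tj := by omega
    have hs : n + 1 + m = (n + m) + 1 := by omega
    rw [hs, pvStepGo]
    rcases lt_or_gt_of_ne hne with hlt | hgt
    · have hij : ¬ ((i, j) = (ti, tj)) := by simp [Prod.mk.injEq]; intro _; omega
      have e1 : (j - tj).toNat = 0 := by omega
      have e1' : ((j + 1) - tj).toNat = 0 := by omega
      have e2 : (tj - j).toNat = (tj - (j + 1)).toNat + 1 := by omega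
      have hnl : ¬ tj < j := by omega
      simp [hij, hne, hnl, ih m i (j + 1) ti tj (by omega) hm, e1, e1', e2, List.replicate_succ]
    · have hij : ¬ ((i, j) = (ti, tj)) := by simp [Prod.mk.injEq]; intro _; omega
      have e1 : (j - tj).toNat = ((j - 1) - tj).toNat + 1 := by omega
      have e2 : (tj - j).toNat = 0 := by omega
      have e3 : (tj - (j - 1)).toNat = 0 := by omega
      have hl : tj < j := by omega
      simp [hij, hne, hl, ih m i (j - 1) ti tj (by omega) hm, e1, e2, e3, List.replicate_succ]

-- closed form, vertical-first
lemma step_false_aux : ∀ n m (i j ti tj : Int), (ti - i).natAbs = n → (tj - j).natAbs = m →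
    pvStepGo (n + m) i j ti tj false =
      List.replicate (ti - i).toNat 'v' ++ List.replicate (i - ti).toNat '^' ++
      List.replicate (j - tj).toNat '<' ++ List.replicate (tj - j).toNat '>' := by
  intro n
  induction n with
  | zero =>
    intro m i j ti tj h hm
    obtain rfl : ti = i := by omega
    simp [Nat.zero_add, step_honly false m ti j tj hm]
  | succ n ih =>
    intro m i j ti tj h hm
    have hne : i ≠ ti := by omega
    have hs : n + 1 + m = (n + m) + 1 := by omega
    rw [hs, pvStepGo]
    rcases lt_or_gt_of_ne hne with hlt | hgt
    · have hij : ¬ ((i, j) = (ti, tj)) := by simp [Prod.mk.injEq]; intro h'; omega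
      have e1 : (ti - i).toNat = (ti - (i + 1)).toNat + 1 := by omega
      have e2 : (i - ti).toNat = 0 := by omega
      have e3 : ((i + 1) - ti).toNat = 0 := by omega
      simp [hij, hne, hlt, ih m (i + 1) j ti tj (by omega) hm, e1, e2, e3, List.replicate_succ]
    · have hij : ¬ ((i, j) = (ti, tj)) := by simp [Prod.mk.injEq]; intro h'; omega
      have e1 : (ti - i).toNat = 0 := by omega
      have e1' : (ti - (i - 1)).toNat = 0 := by omega
      have e2 : (i - ti).toNat = ((i - 1) - ti).toNat + 1 := by omega
      have hnl : ¬ i < ti := by omega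
      simp [hij, hne, hnl, ih m (i - 1) j ti tj (by omega) hm, e1, e1', e2, List.replicate_succ]

lemma step_true' (i j ti tj : Int) :
    pvStep i j ti tj true =
      List.replicate (j - tj).toNat '<' ++ List.replicate (tj - j).toNat '>' ++
      List.replicate (ti - i).toNat 'v' ++ List.replicate (i - ti).toNat '^' := by
  unfold pvStep
  rw [Nat.add_comm]
  exact step_true_aux (tj - j).natAbs (ti - i).natAbs i j ti tj rfl rfl

lemma step_false' (i j ti tj : Int) :
    pvStep i j ti tj false =
      List.replicate (ti - i).toNat 'v' ++ List.replicate (i - ti).toNat '^' ++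
      List.replicate (j - tj).toNat '<' ++ List.replicate (tj - j).toNat '>' := by
  unfold pvStep
  exact step_false_aux (ti - i).natAbs (tj - j).natAbs i j ti tj rfl rfl

-- one step of the walk produces the same characters in both programs
set_option maxHeartbeats 1600000 in
lemma chunk_eq (keypad : List (String × Int × Int)) (s e : Char) :
    pvChunkA keypad s e = pvChunkB keypad s e := by
  unfold pvChunkA pvChunkB
  rcases hq : (pvLk keypad e.toString).getD (0,0) with ⟨ei, ej⟩
  rcases hp : (pvLk keypad s.toString).getD (0,0) with ⟨si, sj⟩
  simp only
  rcases lt_trichotomy ej sj with h1 | h1 | h1 <;>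
  rcases lt_trichotomy ei si with h2 | h2 | h2
  · by_cases hg1 : pvLk keypad " " = some (si, ej) <;>
    by_cases hg2 : pvLk keypad " " = some (ei, sj) <;>
    [skip; skip; skip; skip] <;>
    (try simp_all [List.head?_replicate, List.reverse_replicate, List.reverse_append,
      List.replicate_eq_nil_iff, step_true', step_false', show (-(ej - sj)) = sj - ej from by ring, show (-(ei - si)) = si - ei from by ring, show ej < sj from by omega, show (ej - sj).toNat = 0 from by omega, show (sj - ej).toNat ≠ 0 from by omega, show ¬ sj = ej from by omega, show ¬ ej = sj from by omega, show (ei - si).toNat = 0 from by omega, show (si - ei).toNat ≠ 0 from by omega, show ¬ ei = si from by omega, show ¬ si = ei from by omega]) <;>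
    (try simp [List.head?_replicate, List.reverse_replicate, List.reverse_append,
      List.replicate_eq_nil_iff, step_true', step_false', h1, h2, hg1, hg2, show (-(ej - sj)) = sj - ej from by ring, show (-(ei - si)) = si - ei from by ring, show ej < sj from by omega, show (ej - sj).toNat = 0 from by omega, show (sj - ej).toNat ≠ 0 from by omega, show ¬ sj = ej from by omega, show ¬ ej = sj from by omega, show (ei - si).toNat = 0 from by omega, show (si - ei).toNat ≠ 0 from by omega, show ¬ ei = si from by omega, show ¬ si = ei from by omega]) <;>
    (try omega)
  · by_cases hg1 : pvLk keypad " " = some (si, ej) <;>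
    by_cases hg2 : pvLk keypad " " = some (ei, sj) <;>
    [skip; skip; skip; skip] <;>
    (try simp_all [List.head?_replicate, List.reverse_replicate, List.reverse_append,
      List.replicate_eq_nil_iff, step_true', step_false', show (-(ej - sj)) = sj - ej from by ring, show (-(ei - si)) = si - ei from by ring, show ej < sj from by omega, show (ej - sj).toNat = 0 from by omega, show (sj - ej).toNat ≠ 0 from by omega, show ¬ sj = ej from by omega, show ¬ ej = sj from by omega, show (ei - si).toNat = 0 from by omega, show (si - ei).toNat = 0 from by omega]) <;>
    (try simp [List.head?_replicate, List.reverse_replicate, List.reverse_append,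
      List.replicate_eq_nil_iff, step_true', step_false', h1, h2, hg1, hg2, show (-(ej - sj)) = sj - ej from by ring, show (-(ei - si)) = si - ei from by ring, show ej < sj from by omega, show (ej - sj).toNat = 0 from by omega, show (sj - ej).toNat ≠ 0 from by omega, show ¬ sj = ej from by omega, show ¬ ej = sj from by omega, show (ei - si).toNat = 0 from by omega, show (si - ei).toNat = 0 from by omega]) <;>
    (try omega)
  · by_cases hg1 : pvLk keypad " " = some (si, ej) <;>
    by_cases hg2 : pvLk keypad " " = some (ei, sj) <;>
    [skip; skip; skip; skip] <;>
    (try simp_all [List.head?_replicate, List.reverse_replicate, List.reverse_append,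
      List.replicate_eq_nil_iff, step_true', step_false', show (-(ej - sj)) = sj - ej from by ring, show (-(ei - si)) = si - ei from by ring, show ej < sj from by omega, show (ej - sj).toNat = 0 from by omega, show (sj - ej).toNat ≠ 0 from by omega, show ¬ sj = ej from by omega, show ¬ ej = sj from by omega, show (si - ei).toNat = 0 from by omega, show (ei - si).toNat ≠ 0 from by omega, show ¬ ei = si from by omega, show ¬ si = ei from by omega]) <;>
    (try simp [List.head?_replicate, List.reverse_replicate, List.reverse_append,
      List.replicate_eq_nil_iff, step_true', step_false', h1, h2, hg1, hg2, show (-(ej - sj)) = sj - ej from by ring, show (-(ei - si)) = si - ei from by ring, show ej < sj from by omega, show (ej - sj).toNat = 0 from by omega, show (sj - ej).toNat ≠ 0 from by omega, show ¬ sj = ej from by omega, show ¬ ej = sj from by omega, show (si - ei).toNat = 0 from by omega, show (ei - si).toNat ≠ 0 from by omega, show ¬ ei = si from by omega, show ¬ si = ei from by omega]) <;>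
    (try omega)
  · by_cases hg1 : pvLk keypad " " = some (si, ej) <;>
    by_cases hg2 : pvLk keypad " " = some (ei, sj) <;>
    [skip; skip; skip; skip] <;>
    (try simp_all [List.head?_replicate, List.reverse_replicate, List.reverse_append,
      List.replicate_eq_nil_iff, step_true', step_false', show (-(ej - sj)) = sj - ej from by ring, show (-(ei - si)) = si - ei from by ring, show ¬ ej < sj from by omega, show (ej - sj).toNat = 0 from by omega, show (sj - ej).toNat = 0 from by omega, show (ei - si).toNat = 0 from by omega, show (si - ei).toNat ≠ 0 from by omega, show ¬ ei = si from by omega, show ¬ si = ei from by omega]) <;>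
    (try simp [List.head?_replicate, List.reverse_replicate, List.reverse_append,
      List.replicate_eq_nil_iff, step_true', step_false', h1, h2, hg1, hg2, show (-(ej - sj)) = sj - ej from by ring, show (-(ei - si)) = si - ei from by ring, show ¬ ej < sj from by omega, show (ej - sj).toNat = 0 from by omega, show (sj - ej).toNat = 0 from by omega, show (ei - si).toNat = 0 from by omega, show (si - ei).toNat ≠ 0 from by omega, show ¬ ei = si from by omega, show ¬ si = ei from by omega]) <;>
    (try omega)
  · by_cases hg1 : pvLk keypad " " = some (si, ej) <;>
    by_cases hg2 : pvLk keypad " " = some (ei, sj) <;>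
    [skip; skip; skip; skip] <;>
    (try simp_all [List.head?_replicate, List.reverse_replicate, List.reverse_append,
      List.replicate_eq_nil_iff, step_true', step_false', show (-(ej - sj)) = sj - ej from by ring, show (-(ei - si)) = si - ei from by ring, show ¬ ej < sj from by omega, show (ej - sj).toNat = 0 from by omega, show (sj - ej).toNat = 0 from by omega, show (ei - si).toNat = 0 from by omega, show (si - ei).toNat = 0 from by omega]) <;>
    (try simp [List.head?_replicate, List.reverse_replicate, List.reverse_append,
      List.replicate_eq_nil_iff, step_true', step_false', h1, h2, hg1, hg2, show (-(ej - sj)) = sj - ej from by ring, show (-(ei - si)) = si - ei from by ring, show ¬ ej < sj from by omega, show (ej - sj).toNat = 0 from by omega, show (sj - ej).toNat = 0 from by omega, show (ei - si).toNat = 0 from by omega, show (si - ei).toNat = 0 from by omega]) <;>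
    (try omega)
  · by_cases hg1 : pvLk keypad " " = some (si, ej) <;>
    by_cases hg2 : pvLk keypad " " = some (ei, sj) <;>
    [skip; skip; skip; skip] <;>
    (try simp_all [List.head?_replicate, List.reverse_replicate, List.reverse_append,
      List.replicate_eq_nil_iff, step_true', step_false', show (-(ej - sj)) = sj - ej from by ring, show (-(ei - si)) = si - ei from by ring, show ¬ ej < sj from by omega, show (ej - sj).toNat = 0 from by omega, show (sj - ej).toNat = 0 from by omega, show (si - ei).toNat = 0 from by omega, show (ei - si).toNat ≠ 0 from by omega, show ¬ ei = si from by omega, show ¬ si = ei from by omega]) <;>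
    (try simp [List.head?_replicate, List.reverse_replicate, List.reverse_append,
      List.replicate_eq_nil_iff, step_true', step_false', h1, h2, hg1, hg2, show (-(ej - sj)) = sj - ej from by ring, show (-(ei - si)) = si - ei from by ring, show ¬ ej < sj from by omega, show (ej - sj).toNat = 0 from by omega, show (sj - ej).toNat = 0 from by omega, show (si - ei).toNat = 0 from by omega, show (ei - si).toNat ≠ 0 from by omega, show ¬ ei = si from by omega, show ¬ si = ei from by omega]) <;>
    (try omega)
  · by_cases hg1 : pvLk keypad " " = some (si, ej) <;>
    by_cases hg2 : pvLk keypad " " = some (ei, sj) <;>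
    [skip; skip; skip; skip] <;>
    (try simp_all [List.head?_replicate, List.reverse_replicate, List.reverse_append,
      List.replicate_eq_nil_iff, step_true', step_false', show (-(ej - sj)) = sj - ej from by ring, show (-(ei - si)) = si - ei from by ring, show ¬ ej < sj from by omega, show (sj - ej).toNat = 0 from by omega, show (ej - sj).toNat ≠ 0 from by omega, show ¬ sj = ej from by omega, show ¬ ej = sj from by omega, show (ei - si).toNat = 0 from by omega, show (si - ei).toNat ≠ 0 from by omega, show ¬ ei = si from by omega, show ¬ si = ei from by omega]) <;>
    (try simp [List.head?_replicate, List.reverse_replicate, List.reverse_append,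
      List.replicate_eq_nil_iff, step_true', step_false', h1, h2, hg1, hg2, show (-(ej - sj)) = sj - ej from by ring, show (-(ei - si)) = si - ei from by ring, show ¬ ej < sj from by omega, show (sj - ej).toNat = 0 from by omega, show (ej - sj).toNat ≠ 0 from by omega, show ¬ sj = ej from by omega, show ¬ ej = sj from by omega, show (ei - si).toNat = 0 from by omega, show (si - ei).toNat ≠ 0 from by omega, show ¬ ei = si from by omega, show ¬ si = ei from by omega]) <;>
    (try omega)
  · by_cases hg1 : pvLk keypad " " = some (si, ej) <;>
    by_cases hg2 : pvLk keypad " " = some (ei, sj) <;>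
    [skip; skip; skip; skip] <;>
    (try simp_all [List.head?_replicate, List.reverse_replicate, List.reverse_append,
      List.replicate_eq_nil_iff, step_true', step_false', show (-(ej - sj)) = sj - ej from by ring, show (-(ei - si)) = si - ei from by ring, show ¬ ej < sj from by omega, show (sj - ej).toNat = 0 from by omega, show (ej - sj).toNat ≠ 0 from by omega, show ¬ sj = ej from by omega, show ¬ ej = sj from by omega, show (ei - si).toNat = 0 from by omega, show (si - ei).toNat = 0 from by omega]) <;>
    (try simp [List.head?_replicate, List.reverse_replicate, List.reverse_append,
      List.replicate_eq_nil_iff, step_true', step_false', h1, h2, hg1, hg2, show (-(ej - sj)) = sj - ej from by ring, show (-(ei - si)) = si - ei from by ring, show ¬ ej < sj from by omega, show (sj - ej).toNat = 0 from by omega, show (ej - sj).toNat ≠ 0 from by omega, show ¬ sj = ej from by omega, show ¬ ej = sj from by omega, show (ei - si).toNat = 0 from by omega, show (si - ei).toNat = 0 from by omega]) <;>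
    (try omega)
  · by_cases hg1 : pvLk keypad " " = some (si, ej) <;>
    by_cases hg2 : pvLk keypad " " = some (ei, sj) <;>
    [skip; skip; skip; skip] <;>
    (try simp_all [List.head?_replicate, List.reverse_replicate, List.reverse_append,
      List.replicate_eq_nil_iff, step_true', step_false', show (-(ej - sj)) = sj - ej from by ring, show (-(ei - si)) = si - ei from by ring, show ¬ ej < sj from by omega, show (sj - ej).toNat = 0 from by omega, show (ej - sj).toNat ≠ 0 from by omega, show ¬ sj = ej from by omega, show ¬ ej = sj from by omega, show (si - ei).toNat = 0 from by omega, show (ei - si).toNat ≠ 0 from by omega, show ¬ ei = si from by omega, show ¬ si = ei from by omega]) <;>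
    (try simp [List.head?_replicate, List.reverse_replicate, List.reverse_append,
      List.replicate_eq_nil_iff, step_true', step_false', h1, h2, hg1, hg2, show (-(ej - sj)) = sj - ej from by ring, show (-(ei - si)) = si - ei from by ring, show ¬ ej < sj from by omega, show (sj - ej).toNat = 0 from by omega, show (ej - sj).toNat ≠ 0 from by omega, show ¬ sj = ej from by omega, show ¬ ej = sj from by omega, show (si - ei).toNat = 0 from by omega, show (ei - si).toNat ≠ 0 from by omega, show ¬ ei = si from by omega, show ¬ si = ei from by omega]) <;>
    (try omega)

lemma foldB_acc (keypad : List (String × Int × Int)) :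
    ∀ (l : List Char) (a : Char) (out : List Char),
      (l.foldl (fun (st : Char × List Char) ch =>
        (ch, st.2 ++ pvChunkB keypad st.1 ch)) (a, out)).2
      = out ++ (l.foldl (fun (st : Char × List Char) ch =>
        (ch, st.2 ++ pvChunkB keypad st.1 ch)) (a, [])).2 := by
  intro l
  induction l with
  | nil => intro a out; simp
  | cons x xs ih =>
    intro a out
    simp only [List.foldl_cons]
    rw [ih x (out ++ pvChunkB keypad a x), ih x ([] ++ pvChunkB keypad a x)]
    simp

lemma foldA_acc (keypad : List (String × Int × Int)) :
    ∀ (pairs : List (Char × Char)) (acc : List Char),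
      pairs.foldl (fun acc se => acc ++ pvChunkA keypad se.1 se.2) acc
      = acc ++ pairs.foldl (fun acc se => acc ++ pvChunkA keypad se.1 se.2) [] := by
  intro pairs
  induction pairs with
  | nil => intro acc; simp
  | cons p ps ih =>
    intro acc
    simp only [List.foldl_cons]
    rw [ih (acc ++ pvChunkA keypad p.1 p.2), ih ([] ++ pvChunkA keypad p.1 p.2)]
    simp

lemma zip_shift (a x : Char) (xs : List Char) :
    List.zip (a :: (x :: xs).dropLast) (x :: xs)
      = (a, x) :: List.zip (x :: xs.dropLast) xs := by
  cases xs <;> simp [List.zip]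

lemma main_eq (keypad : List (String × Int × Int)) :
    ∀ (l : List Char) (a : Char),
      (List.zip (a :: l.dropLast) l).foldl
        (fun acc se => acc ++ pvChunkA keypad se.1 se.2) []
      = (l.foldl (fun (st : Char × List Char) ch =>
          (ch, st.2 ++ pvChunkB keypad st.1 ch)) (a, [])).2 := by
  intro l
  induction l with
  | nil => intro a; simp
  | cons x xs ih =>
    intro a
    rw [zip_shift, List.foldl_cons, List.foldl_cons, foldA_acc, foldB_acc, ih x]
    simp [chunk_eq]

-- ===== VERDICT (by name: the statement is the Claim_ definition above) =====
theorem meta_code_spec : Claim_equal_meta_code := by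
  intro code keypad _ _
  unfold Spec_meta_code meta_code meta_code_alt
  rw [PySem.List.slice_to_neg_one]
  exact congrArg String.ofList (main_eq keypad code.toList 'A')
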